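-- pv_equiv track=rewrite | github.com/aotakataka/thesis | howtofold.py | remove_subroutes
-- ===== SOURCE A (Python) =====
-- def remove_subroutes(routes):
--     # 長さで降順にソート
--     routes.sort(key=len, reverse=True)
--
--     # 完全なルートを基準に部分ルートを削除
--     filtered_routes = []
--     for i, route in enumerate(routes):
--         is_subroute = False
--         for longer_route in filtered_routes:
--             if len(route) < len(longer_route) and route == longer_route[:len(route)]:
--                 is_subroute = True
--                 break
--         if not is_subroute:
--             filtered_routes.append(route)
--     return filtered_routes
-- ===== SOURCE B (Python) =====
-- def remove_subroutes(routes):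
--     routes.sort(key=len, reverse=True)
--     lengths = {len(r) for r in routes}
--     prefixes = set()
--     for r in routes:
--         t = tuple(r)
--         for k in lengths:
--             if k < len(t):
--                 prefixes.add(t[:k])
--     return [r for r in routes if tuple(r) not in prefixes]
-- ===== Notes on version B (the rewrite author's own statement) =====
-- stated objective: alternative
-- what changed: Instead of scanning the kept list for each route, B builds one set of the routes' prefixes (only at lengths that actually occur among the routes) and tests each route with a single set lookup.
import Mathlib
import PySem

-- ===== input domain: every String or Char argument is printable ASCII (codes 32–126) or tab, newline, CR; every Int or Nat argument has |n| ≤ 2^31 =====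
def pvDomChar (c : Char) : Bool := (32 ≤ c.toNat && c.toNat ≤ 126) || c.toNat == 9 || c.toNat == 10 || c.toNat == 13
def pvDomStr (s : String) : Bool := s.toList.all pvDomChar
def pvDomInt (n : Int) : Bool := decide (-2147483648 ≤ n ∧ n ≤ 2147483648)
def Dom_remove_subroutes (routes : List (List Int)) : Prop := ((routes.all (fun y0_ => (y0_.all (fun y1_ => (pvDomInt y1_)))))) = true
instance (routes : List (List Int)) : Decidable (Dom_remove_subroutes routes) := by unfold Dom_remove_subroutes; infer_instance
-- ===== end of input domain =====

-- B replaces A's inner scan of the kept list by a set of the routes' prefixes (taken only at lengths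
-- that occur among the routes), built once, so each route is tested with one set lookup. (A sorts its
-- argument in place; B performs the same in-place sort; the equivalence proved is about the return value.)

-- ===== PORT A =====
def remove_subroutes (routes : List (List Int)) : List (List Int) :=
  (PySem.List.sorted routes (fun r => PySem.List.len r) true).foldl
    (fun filtered route =>
      let is_subroute := filtered.any (fun longer_route =>
        decide (PySem.List.len route < PySem.List.len longer_route) &&
        decide (route = PySem.List.slice longer_route none (some (PySem.List.len route))))
      if is_subroute then filtered else filtered ++ [route]) []

-- ===== PORT B =====
def remove_subroutes_alt (routes : List (List Int)) : List (List Int) :=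
  let s := PySem.List.sorted routes (fun r => PySem.List.len r) true
  let lengths : PySem.Set Int := PySem.Set.ofList (s.map (fun r => PySem.List.len r))
  let prefixes : PySem.Set (List Int) :=
    s.foldl (fun acc r =>
      lengths.foldl (fun acc2 k =>
        if k < PySem.List.len r then PySem.Set.add acc2 (PySem.List.slice r none (some k))
        else acc2) acc)
      PySem.Set.empty
  s.filter (fun r => !(PySem.Set.contains prefixes r))

-- ===== PRECONDITION & SPEC =====
def Spec_remove_subroutes (routes : List (List Int)) (out : List (List Int)) : Prop := out = remove_subroutes_alt routes
instance (routes : List (List Int)) (out : List (List Int)) : Decidable (Spec_remove_subroutes routes out) := by unfold Spec_remove_subroutes; infer_instance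

-- ===== CLAIM (what is proved, stated in full; the proofs are below) =====
def Claim_equal_remove_subroutes : Prop := ∀ (routes : List (List Int)), Dom_remove_subroutes routes → Spec_remove_subroutes routes (remove_subroutes routes)

-- ===== LEMMAS AND PROOFS =====

/-- `r` is a strict (proper) prefix of `x`. -/
def isSub (r x : List Int) : Bool := decide (r.length < x.length) && decide (r = x.take r.length)

theorem isSub_iff (r x : List Int) : isSub r x = true ↔ r.length < x.length ∧ r = x.take r.length := by
  simp [isSub]

/-- A's inner test is exactly `isSub`. -/
theorem predA_eq (route lr : List Int) :
    (decide (PySem.List.len route < PySem.List.len lr) &&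
      decide (route = PySem.List.slice lr none (some (PySem.List.len route)))) = isSub route lr := by
  simp [isSub, PySem.List.len_eq,
    PySem.List.slice_to (xs := lr) (b := (route.length : Int)) (Int.natCast_nonneg _)]

/-- transitivity of strict prefix -/
theorem isSub_trans {r x y : List Int} (h1 : isSub r x = true) (h2 : isSub x y = true) :
    isSub r y = true := by
  rw [isSub_iff] at *
  obtain ⟨hl1, he1⟩ := h1
  obtain ⟨hl2, he2⟩ := h2
  refine ⟨by omega, ?_⟩
  conv_lhs => rw [he1, he2]
  rw [List.take_take]
  congr 1
  omega

/-- a strict extension in `s` can be chosen of maximal length, hence itself unextendable in `s` -/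
theorem exists_maximal_sub (s : List (List Int)) (r : List Int)
    (h : ∃ x ∈ s, isSub r x = true) :
    ∃ x ∈ s, isSub r x = true ∧ ∀ y ∈ s, isSub x y = false := by
  obtain ⟨x0, hx0s, hx0⟩ := h
  have hne : s.filter (fun x => isSub r x) ≠ [] := by
    intro hnil
    have : x0 ∈ s.filter (fun x => isSub r x) := List.mem_filter.mpr ⟨hx0s, hx0⟩
    rw [hnil] at this
    exact absurd this (List.not_mem_nil)
  cases hx : (s.filter (fun x => isSub r x)).argmax (fun y => y.length) with
  | none => exact absurd (List.argmax_eq_none.mp hx) hne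
  | some x =>
    have hxmem := List.argmax_mem hx
    obtain ⟨hxs, hxsub⟩ := List.mem_filter.mp hxmem
    refine ⟨x, hxs, hxsub, fun y hy => ?_⟩
    rw [Bool.eq_false_iff]
    intro hxy
    have hysub : isSub r y = true := isSub_trans hxsub hxy
    have hle : y.length ≤ x.length :=
      List.le_of_mem_argmax (List.mem_filter.mpr ⟨hy, hysub⟩) hx
    have := (isSub_iff x y).mp hxy
    omega

/-- membership in the inner conditional-add fold over the candidate lengths -/
theorem mem_len_fold (L : List Int) (t : List Int) (acc : PySem.Set (List Int)) (y : List Int) :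
    y ∈ L.foldl (fun acc2 k =>
        if k < PySem.List.len t then PySem.Set.add acc2 (PySem.List.slice t none (some k))
        else acc2) acc
      ↔ y ∈ acc ∨ ∃ k ∈ L, k < PySem.List.len t ∧ y = PySem.List.slice t none (some k) := by
  induction L generalizing acc with
  | nil => simp
  | cons k L ih =>
    rw [List.foldl_cons]
    by_cases hk : k < PySem.List.len t
    · rw [if_pos hk, ih]
      constructor
      · rintro (h | ⟨k', hk', h1, h2⟩)
        · rcases (PySem.Set.mem_add _ _ _).mp h with h | rfl
          · exact Or.inl h
          · exact Or.inr ⟨k, List.mem_cons_self, hk, rfl⟩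
        · exact Or.inr ⟨k', List.mem_cons_of_mem _ hk', h1, h2⟩
      · rintro (h | ⟨k', hk', h1, h2⟩)
        · exact Or.inl ((PySem.Set.mem_add _ _ _).mpr (Or.inl h))
        · rcases List.mem_cons.mp hk' with rfl | hk''
          · exact Or.inl ((PySem.Set.mem_add _ _ _).mpr (Or.inr h2))
          · exact Or.inr ⟨k', hk'', h1, h2⟩
    · rw [if_neg hk, ih]
      constructor
      · rintro (h | ⟨k', hk', h1, h2⟩)
        · exact Or.inl h
        · exact Or.inr ⟨k', List.mem_cons_of_mem _ hk', h1, h2⟩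
      · rintro (h | ⟨k', hk', h1, h2⟩)
        · exact Or.inl h
        · rcases List.mem_cons.mp hk' with rfl | hk''
          · exact absurd h1 hk
          · exact Or.inr ⟨k', hk'', h1, h2⟩

/-- membership in B's prefix set -/
theorem mem_prefix_fold (L : List Int) (l : List (List Int)) (acc : PySem.Set (List Int)) (y : List Int) :
    y ∈ l.foldl (fun acc r =>
      L.foldl (fun acc2 k =>
        if k < PySem.List.len r then PySem.Set.add acc2 (PySem.List.slice r none (some k))
        else acc2) acc) acc
      ↔ y ∈ acc ∨ ∃ x ∈ l, ∃ k ∈ L, k < PySem.List.len x ∧ y = PySem.List.slice x none (some k) := by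
  induction l generalizing acc with
  | nil => simp
  | cons x l ih =>
    rw [List.foldl_cons, ih, mem_len_fold]
    constructor
    · rintro ((h | h) | ⟨z, hz, hrest⟩)
      · exact Or.inl h
      · exact Or.inr ⟨x, List.mem_cons_self, h⟩
      · exact Or.inr ⟨z, List.mem_cons_of_mem _ hz, hrest⟩
    · rintro (h | ⟨z, hz, hrest⟩)
      · exact Or.inl (Or.inl h)
      · rcases List.mem_cons.mp hz with rfl | hz'
        · exact Or.inl (Or.inr hrest)
        · exact Or.inr ⟨z, hz', hrest⟩

/-- B's set lookup decides "has a strict extension somewhere in the list" (for routes of the list) -/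
theorem contains_prefixes (s : List (List Int)) (r : List Int) (hr : r ∈ s) :
    PySem.Set.contains (s.foldl (fun acc r =>
      (PySem.Set.ofList (s.map (fun r => PySem.List.len r))).foldl (fun acc2 k =>
        if k < PySem.List.len r then PySem.Set.add acc2 (PySem.List.slice r none (some k))
        else acc2) acc)
      PySem.Set.empty) r = s.any (isSub r) := by
  rw [Bool.eq_iff_iff, PySem.Set.contains_iff, mem_prefix_fold, List.any_eq_true]
  simp only [PySem.Set.empty, List.not_mem_nil, false_or]
  constructor
  · rintro ⟨x, hx, k, hkL, hklt, heq⟩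
    obtain ⟨r', _, rfl⟩ := List.mem_map.mp ((PySem.Set.mem_ofList _ _).mp hkL)
    simp only [PySem.List.len_eq] at hklt heq
    rw [PySem.List.slice_to _ (Int.natCast_nonneg _), Int.toNat_natCast] at heq
    refine ⟨x, hx, (isSub_iff r x).mpr ⟨?_, ?_⟩⟩
    · rw [heq, List.length_take]
      omega
    · rw [heq, List.length_take]
      congr 1
      omega
  · rintro ⟨x, hx, hsub⟩
    obtain ⟨hl, he⟩ := (isSub_iff r x).mp hsub
    refine ⟨x, hx, (r.length : Int), ?_, ?_, ?_⟩
    · exact (PySem.Set.mem_ofList _ _).mpr (List.mem_map.mpr ⟨r, hr, (PySem.List.len_eq r).symm⟩)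
    · rw [PySem.List.len_eq]
      exact_mod_cast hl
    · rw [PySem.List.slice_to _ (Int.natCast_nonneg _), Int.toNat_natCast]
      exact he

/-- A's fold, run over a length-descending list, is the filter by "no strict extension in the whole list" -/
theorem foldA_filter (s : List (List Int))
    (hs : s.Pairwise (fun a b => b.length ≤ a.length)) :
    ∀ (suf pre : List (List Int)), s = pre ++ suf →
      suf.foldl (fun filtered route =>
        let is_subroute := filtered.any (fun longer_route =>
          decide (PySem.List.len route < PySem.List.len longer_route) &&
          decide (route = PySem.List.slice longer_route none (some (PySem.List.len route))))
        if is_subroute then filtered else filtered ++ [route])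
        (pre.filter (fun q => !(s.any (isSub q))))
      = s.filter (fun q => !(s.any (isSub q))) := by
  intro suf
  induction suf with
  | nil =>
    intro pre hpre
    rw [List.foldl_nil, hpre, List.append_nil]
  | cons r rest ih =>
    intro pre hpre
    have hfun : (fun longer_route =>
        decide (PySem.List.len r < PySem.List.len longer_route) &&
        decide (r = PySem.List.slice longer_route none (some (PySem.List.len r)))) = isSub r := by
      funext lr; exact predA_eq r lr
    have hcond' : (pre.filter (fun q => !(s.any (isSub q)))).any (isSub r) = s.any (isSub r) := by
      rw [Bool.eq_iff_iff, List.any_eq_true, List.any_eq_true]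
      constructor
      · rintro ⟨lr, hlr, hsub⟩
        exact ⟨lr, hpre ▸ List.mem_append_left _ (List.mem_filter.mp hlr).1, hsub⟩
      · rintro ⟨x0, hx0s, hx0⟩
        obtain ⟨x, hxs, hxsub, hxmax⟩ := exists_maximal_sub s r ⟨x0, hx0s, hx0⟩
        have hxpre : x ∈ pre := by
          rw [hpre] at hxs
          rcases List.mem_append.mp hxs with h | h
          · exact h
          · exfalso
            rcases List.mem_cons.mp h with hxr | hrest
            · have h2 := (isSub_iff r x).mp hxsub
              rw [hxr] at h2
              omega
            · have hp := List.pairwise_append.mp (hpre ▸ hs)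
              have hler : x.length ≤ r.length :=
                (List.pairwise_cons.mp hp.2.1).1 x hrest
              have := (isSub_iff r x).mp hxsub
              omega
        have hkeep : (!(s.any (isSub x))) = true := by
          simp only [Bool.not_eq_eq_eq_not, Bool.not_true, List.any_eq_false]
          intro y hy
          rw [hxmax y hy]
          simp
        exact ⟨x, List.mem_filter.mpr ⟨hxpre, hkeep⟩, hxsub⟩
    rw [List.foldl_cons]
    simp only [hfun]
    rw [hcond']
    cases hany : s.any (isSub r) with
    | true =>
      simp only [if_pos]
      have hfr : (pre ++ [r]).filter (fun q => !(s.any (isSub q))) =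
          pre.filter (fun q => !(s.any (isSub q))) := by
        rw [List.filter_append]
        simp [hany]
      rw [← hfr]
      exact ih (pre ++ [r]) (by rw [hpre, List.append_assoc]; rfl)
    | false =>
      rw [if_neg (by simp)]
      have hfr : (pre ++ [r]).filter (fun q => !(s.any (isSub q))) =
          pre.filter (fun q => !(s.any (isSub q))) ++ [r] := by
        rw [List.filter_append]
        simp [hany]
      rw [← hfr]
      exact ih (pre ++ [r]) (by rw [hpre, List.append_assoc]; rfl)

-- ===== VERDICT (by name: the statement is the Claim_ definition above) =====
theorem remove_subroutes_spec : Claim_equal_remove_subroutes := by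
  intro routes _
  unfold Spec_remove_subroutes remove_subroutes remove_subroutes_alt
  simp only []
  set s := PySem.List.sorted routes (fun r => PySem.List.len r) true with hsdef
  have hs : s.Pairwise (fun a b => b.length ≤ a.length) := by
    refine (PySem.List.sorted_pairwise_rev (xs := routes) (key := fun r => PySem.List.len r)).imp ?_
    intro a b h
    simp only [PySem.List.len_eq] at h
    exact_mod_cast h
  have hA := foldA_filter s hs s [] rfl
  rw [List.filter_nil] at hA
  rw [hA]
  refine List.filter_congr fun r hr => ?_
  rw [contains_prefixes s r hr]
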